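-- pv_equiv track=rewrite | github.com/vivekshende88/GoogleCloudGenAI_SmartResume_Easy | app.py | safe_pdf_line
-- ===== SOURCE A (Python) =====
-- def safe_pdf_line(line, max_token_len=50):
--     """Break long words to prevent PDF errors."""
--     safe_line = ""
--     for word in line.split(" "):
--         if len(word) > max_token_len:
--             new_word = "\u200b".join([word[i:i+max_token_len] for i in range(0, len(word), max_token_len)])
--             safe_line += new_word + " "
--         else:
--             safe_line += word + " "
--     return safe_line.strip()
-- ===== SOURCE B (Python) =====
-- def safe_pdf_line(line, max_token_len=50):
--     """Break long words to prevent PDF errors (single pass, no split/rebuild)."""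
--     out = []
--     k = 0  # length of the current non-space run so far
--     for c in line:
--         if c == ' ':
--             k = 0
--         else:
--             if k > 0 and k % max_token_len == 0:
--                 out.append('\u200b')
--             k += 1
--         out.append(c)
--     return ''.join(out).strip()
-- ===== Notes on version B (the rewrite author's own statement) =====
-- stated objective: simpler
-- what changed: Replaces split-on-space / per-word chunk-join / rebuild-and-strip with a single character pass that keeps a run-length counter and emits a zero-width space before every character whose in-word index is a positive multiple of max_token_len, then strips.
-- outside the precondition, e.g. on safe_pdf_line('ab', 0): A raises ValueError, B raises ZeroDivisionError; on safe_pdf_line('ab', -1): A returns '', B returns 'a\u200bb'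
import Mathlib
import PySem

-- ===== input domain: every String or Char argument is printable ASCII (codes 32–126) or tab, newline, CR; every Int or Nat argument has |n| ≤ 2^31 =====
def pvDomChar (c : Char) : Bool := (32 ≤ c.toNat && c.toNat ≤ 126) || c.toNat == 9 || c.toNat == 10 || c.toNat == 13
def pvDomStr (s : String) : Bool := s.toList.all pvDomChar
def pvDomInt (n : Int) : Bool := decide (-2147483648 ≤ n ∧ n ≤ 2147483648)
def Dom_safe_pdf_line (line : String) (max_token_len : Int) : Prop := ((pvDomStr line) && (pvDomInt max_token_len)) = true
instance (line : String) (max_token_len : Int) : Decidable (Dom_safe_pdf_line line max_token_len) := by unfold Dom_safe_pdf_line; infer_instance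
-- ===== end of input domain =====

-- B replaces A's split/per-word-chunk-join/rebuild with a single character pass keeping a
-- run-length counter (objective: simpler); equal to A for every max_token_len ≥ 1.


-- ===== PORT A =====
def safe_pdf_line (line : String) (max_token_len : Int) : String :=
  let words := PySem.Chars.splitOn line.toList [' ']
  let safe_line := words.foldl (fun acc word =>
    if (word.length : Int) > max_token_len then
      acc ++ PySem.Chars.join ['\u200B']
        ((PySem.List.pyRange 0 (word.length : Int) max_token_len).map
          (fun i => PySem.List.slice word (some i) (some (i + max_token_len)))) ++ [' ']
    else acc ++ word ++ [' ']) []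
  String.ofList (PySem.Chars.strip safe_line)

-- ===== PORT B =====
def pvAltGo (max_token_len : Int) : Nat → List Char → List Char
  | _, [] => []
  | k, c :: rest =>
    if c = ' ' then c :: pvAltGo max_token_len 0 rest
    else if 0 < k ∧ PySem.Int.mod (k : Int) max_token_len = 0 then
      '\u200B' :: c :: pvAltGo max_token_len (k+1) rest
    else c :: pvAltGo max_token_len (k+1) rest

def safe_pdf_line_alt (line : String) (max_token_len : Int) : String :=
  String.ofList (PySem.Chars.strip (pvAltGo max_token_len 0 line.toList))

-- ===== PRECONDITION & SPEC =====
-- Pre_ excludes non-positive max_token_len, on which A leaves the natural domain: at 0 A raises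
-- ValueError (range step 0), and for negative values the chunk comprehension is empty so A silently
-- deletes every word — an artefact of Python's negative range step; B assumes a positive chunk size.
def Pre_safe_pdf_line (_line : String) (max_token_len : Int) : Prop := 1 ≤ max_token_len
instance (line : String) (max_token_len : Int) : Decidable (Pre_safe_pdf_line line max_token_len) := by unfold Pre_safe_pdf_line; infer_instance
def pvWitness_safe_pdf_line : String × Int := ("hello world", 3)
def Spec_safe_pdf_line (line : String) (max_token_len : Int) (out : String) : Prop := out = safe_pdf_line_alt line max_token_len
instance (line : String) (max_token_len : Int) (out : String) : Decidable (Spec_safe_pdf_line line max_token_len out) := by unfold Spec_safe_pdf_line; infer_instance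

-- ===== CLAIM =====
def Claim_equal_safe_pdf_line : Prop := ∀ (line : String) (max_token_len : Int), Dom_safe_pdf_line line max_token_len → Pre_safe_pdf_line line max_token_len → Spec_safe_pdf_line line max_token_len (safe_pdf_line line max_token_len)

-- ===== LEMMAS AND PROOFS =====

-- split on single ' ' (what line.split(" ") computes), in directly-recursive form
def pvSplitSp : List Char → List (List Char)
  | [] => [[]]
  | c :: r => if c = ' ' then [] :: pvSplitSp r else (c :: (pvSplitSp r).headI) :: (pvSplitSp r).tail

-- per-word marker: a ZWSP before every char whose in-word index is a positive multiple of m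
def pvMarkGo (m : Nat) : Nat → List Char → List Char
  | _, [] => []
  | k, c :: cs => if 0 < k ∧ k % m = 0 then '\u200B' :: c :: pvMarkGo m (k+1) cs else c :: pvMarkGo m (k+1) cs

theorem pvSplitSp_ne_nil (cs : List Char) : pvSplitSp cs ≠ [] := by
  cases cs with
  | nil => simp [pvSplitSp]
  | cons c r => unfold pvSplitSp; split <;> simp

theorem pvModifyHead_id {α : Type} (l : List α) : List.modifyHead (fun x => x) l = l := by
  cases l <;> simp
theorem pvSplitOn_go_eq (fuel : Nat) (l cur : List Char) (acc : List (List Char))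
    (h : l.length < fuel) :
    PySem.Chars.splitOn.go [' '] fuel l cur acc
      = acc.reverse ++ (pvSplitSp l).modifyHead (cur.reverse ++ ·) := by
  induction fuel generalizing l cur acc with
  | zero => omega
  | succ f ih =>
    cases l with
    | nil => simp [PySem.Chars.splitOn.go, pvSplitSp]
    | cons c rest =>
      simp only [PySem.Chars.splitOn.go]
      by_cases hc : c = ' '
      · subst hc
        rw [if_pos (by simp [List.isPrefixOf])]
        simp only [List.length_singleton, List.drop_one, List.tail_cons]
        rw [ih rest [] (List.reverse cur :: acc) (by simp at h; omega)]
        simp [pvSplitSp, pvModifyHead_id]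
      · rw [if_neg (by simp [List.isPrefixOf]; exact fun h' => hc h'.symm)]
        rw [ih rest (c :: cur) acc (by simp at h; omega)]
        have hne := pvSplitSp_ne_nil rest
        obtain ⟨w, t, hw⟩ := List.exists_cons_of_ne_nil hne
        simp [pvSplitSp, hc, hw]

theorem pvSplitOn_eq (cs : List Char) : PySem.Chars.splitOn cs [' '] = pvSplitSp cs := by
  rw [PySem.Chars.splitOn, pvSplitOn_go_eq cs.length.succ cs [] [] (by omega)]
  simp [pvModifyHead_id]



theorem pvAltGo_eq (max : Int) (hmax : 1 ≤ max) (cs : List Char) (k : Nat) :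
    pvAltGo max k cs
      = pvMarkGo max.toNat k (pvSplitSp cs).headI
        ++ (pvSplitSp cs).tail.flatMap (fun w => ' ' :: pvMarkGo max.toNat 0 w) := by
  have hcast : ((max.toNat : Nat) : Int) = max := Int.toNat_of_nonneg (by omega)
  have hiff : ∀ k : Nat, (0 < k ∧ PySem.Int.mod (k : Int) max = 0) ↔ (0 < k ∧ k % max.toNat = 0) := by
    intro k
    rw [← hcast, PySem.Int.mod_natCast]
    constructor <;> rintro ⟨h1, h2⟩ <;> exact ⟨h1, by exact_mod_cast h2⟩
  set m := max.toNat with hm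
  induction cs generalizing k with
  | nil => simp [pvAltGo, pvSplitSp, pvMarkGo]
  | cons c rest ih =>
    by_cases hc : c = ' '
    · subst hc
      obtain ⟨w, t, hw⟩ := List.exists_cons_of_ne_nil (pvSplitSp_ne_nil rest)
      simp only [pvAltGo, pvSplitSp, List.headI_cons, List.tail_cons,
        hw, List.flatMap_cons]
      rw [ih 0]
      simp [hw, pvMarkGo]
    · obtain ⟨w, t, hw⟩ := List.exists_cons_of_ne_nil (pvSplitSp_ne_nil rest)
      simp only [pvAltGo, if_neg hc, pvSplitSp, hw]
      rw [ih (k+1)]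
      simp only [hw, List.headI_cons, List.tail_cons, pvMarkGo]
      by_cases hcond : 0 < k ∧ k % m = 0
      · rw [if_pos ((hiff k).mpr hcond), if_pos hcond]; simp
      · rw [if_neg (fun h => hcond ((hiff k).mp h)), if_neg hcond]; simp
theorem pvMarkGo_congr (m : Nat) (cs : List Char) (k₁ k₂ : Nat)
    (h1 : k₁ % m = k₂ % m) (h2 : k₁ = 0 ↔ k₂ = 0) :
    pvMarkGo m k₁ cs = pvMarkGo m k₂ cs := by
  induction cs generalizing k₁ k₂ with
  | nil => rfl
  | cons c cs ih =>
    have hcond : (0 < k₁ ∧ k₁ % m = 0) ↔ (0 < k₂ ∧ k₂ % m = 0) := by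
      constructor <;> rintro ⟨ha, hb⟩ <;> omega
    have htail : pvMarkGo m (k₁+1) cs = pvMarkGo m (k₂+1) cs := by
      apply ih
      · rw [Nat.add_mod k₁, Nat.add_mod k₂, h1]
      · omega
    simp only [pvMarkGo]
    by_cases h : 0 < k₁ ∧ k₁ % m = 0
    · rw [if_pos h, if_pos (hcond.mp h), htail]
    · rw [if_neg h, if_neg (fun hc => h (hcond.mpr hc)), htail]

theorem pvMarkGo_shift (m : Nat) (w : List Char) (k : Nat) (hk : 0 < k) (hm : k % m = 0) :
    pvMarkGo m k w = (if w = [] then [] else ['\u200B']) ++ pvMarkGo m 0 w := by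
  cases w with
  | nil => rfl
  | cons c cs =>
    simp only [pvMarkGo, if_pos (And.intro hk hm), reduceCtorEq, if_false,
      Nat.lt_irrefl, false_and, if_neg, List.singleton_append, Nat.zero_add]
    refine congrArg _ (congrArg _ (pvMarkGo_congr m cs (k+1) 1 ?_ (by omega)))
    rw [Nat.add_mod, hm]; simp [Nat.mod_mod_of_dvd]

theorem pvMarkGo_noins (m : Nat) (w : List Char) (k : Nat) (h : k + w.length ≤ m) :
    pvMarkGo m k w = w := by
  induction w generalizing k with
  | nil => rfl
  | cons c cs ih =>
    have : ¬ (0 < k ∧ k % m = 0) := by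
      rintro ⟨hk, hkm⟩
      have : k < m := by simp at h; omega
      rw [Nat.mod_eq_of_lt this] at hkm; omega
    simp only [pvMarkGo, if_neg this]
    exact congrArg _ (ih (k+1) (by simp at h ⊢; omega))

theorem pvMarkGo_take_drop (m : Nat) (hm : 0 < m) (w : List Char) (k : Nat) (hk : k < m) :
    pvMarkGo m k w = w.take (m - k) ++ pvMarkGo m m (w.drop (m - k)) := by
  induction w generalizing k with
  | nil => simp [pvMarkGo]
  | cons c cs ih =>
    have hnc : ¬ (0 < k ∧ k % m = 0) := by
      rintro ⟨h1, h2⟩; rw [Nat.mod_eq_of_lt hk] at h2; omega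
    simp only [pvMarkGo, if_neg hnc]
    have h1 : m - k = (m - (k+1)) + 1 := by omega
    rw [h1, List.take_succ_cons, List.drop_succ_cons]
    by_cases h2 : k + 1 < m
    · rw [ih (k+1) h2]; simp
    · have hk1 : k + 1 = m := by omega
      have : m - (k+1) = 0 := by omega
      rw [this]; simp [hk1]

theorem pvStrip_append_space (x : List Char) :
    PySem.Chars.strip (x ++ [' ']) = PySem.Chars.strip x := by
  have hsp : PySem.Chars.isspace ' ' = true := by decide
  simp only [PySem.Chars.strip, PySem.Chars.lstrip, PySem.Chars.rstrip]
  rw [List.dropWhile_append]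
  split
  · next h =>
    rw [List.isEmpty_iff] at h
    rw [h]
    simp [List.dropWhile, hsp]
  · next h =>
    simp [List.dropWhile_cons, hsp]
theorem pvChunks_eq (m : Nat) (hm : 0 < m) (n : Nat) (w : List Char)
    (hn : w.length ≤ n) (hw : 0 < w.length) :
    PySem.Chars.join ['\u200B']
      ((List.range ((w.length + m - 1)/m)).map (fun k => (w.drop (m*k)).take m))
      = pvMarkGo m 0 w := by
  induction n generalizing w with
  | zero => omega
  | succ n ih =>
    by_cases hL : w.length ≤ m
    · have hq : (w.length + m - 1)/m = 1 := by
        have h3 : w.length + m - 1 = (w.length - 1) + m := by omega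
        rw [h3, Nat.add_div_right _ hm, Nat.div_eq_of_lt (by omega)]
      rw [hq, pvMarkGo_noins m w 0 (by omega)]
      simp [PySem.Chars.join, List.intercalate, List.take_of_length_le hL]
    · push_neg at hL
      have hq : (w.length + m - 1)/m = ((w.drop m).length + m - 1)/m + 1 := by
        have h3 : w.length + m - 1 = ((w.drop m).length + m - 1) + m := by
          simp; omega
        rw [h3, Nat.add_div_right _ hm]
      have hchunk : ∀ k, (w.drop (m*(k+1))).take m = ((w.drop m).drop (m*k)).take m := by
        intro k
        rw [List.drop_drop]
        ring_nf
      have hdnn : w.drop m ≠ [] := by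
        simp [List.drop_eq_nil_iff]; omega
      have hih := ih (w.drop m) (by simp; omega) (by simp; omega)
      have hq1 : 0 < ((w.drop m).length + m - 1)/m := Nat.div_pos (by simp; omega) hm
      rw [hq, List.range_succ_eq_map]
      simp only [List.map_cons, Nat.mul_zero, List.drop_zero, List.map_map]
      have hmapeq : (List.range (((w.drop m).length + m - 1)/m)).map
            ((fun k => (w.drop (m*k)).take m) ∘ Nat.succ)
          = (List.range (((w.drop m).length + m - 1)/m)).map (fun k => ((w.drop m).drop (m*k)).take m) := by
        apply List.map_congr_left
        intro k _
        simp only [Function.comp_apply, Nat.succ_eq_add_one]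
        exact hchunk k
      rw [hmapeq]
      obtain ⟨q', hq'⟩ := Nat.exists_eq_add_of_lt hq1
      have hconslist : ∃ a t, (List.range (((w.drop m).length + m - 1)/m)).map
          (fun k => ((w.drop m).drop (m*k)).take m) = a :: t := by
        rw [hq', List.range_succ_eq_map]
        simp only [List.map_cons]
        exact ⟨_, _, rfl⟩
      obtain ⟨a, t, hat⟩ := hconslist
      rw [hat]
      have hjoin : PySem.Chars.join ['\u200B'] (w.take m :: a :: t)
          = w.take m ++ '\u200B' :: PySem.Chars.join ['\u200B'] (a :: t) := by
        simp [PySem.Chars.join, List.intercalate, List.intersperse]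
      rw [hjoin, ← hat, hih, pvMarkGo_take_drop m hm w 0 (by omega)]
      simp only [Nat.sub_zero]
      rw [pvMarkGo_shift m (w.drop m) m hm (Nat.mod_self m), if_neg hdnn]
      simp

theorem pvFlatMap_sep (f : List Char → List Char) (t : List (List Char)) (w₀ : List Char) :
    List.flatMap (fun w => f w ++ [' ']) (w₀ :: t)
      = (f w₀ ++ t.flatMap (fun w => ' ' :: f w)) ++ [' '] := by
  induction t generalizing w₀ with
  | nil => simp
  | cons w₁ t ih =>
    rw [List.flatMap_cons, ih w₁]
    simp

theorem pvRange_slice_eq (w : List Char) (max : Int) (hmax : 1 ≤ max)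
    (hlen : (w.length : Int) > max) :
    (PySem.List.pyRange 0 (w.length : Int) max).map
        (fun i => PySem.List.slice w (some i) (some (i + max)))
      = (List.range ((w.length + max.toNat - 1)/max.toNat)).map
          (fun k => (w.drop (max.toNat*k)).take max.toNat) := by
  have hm : 0 < max.toNat := by omega
  have hcast : ((max.toNat : Nat) : Int) = max := Int.toNat_of_nonneg (by omega)
  have hcount : ((w.length : Int) - 0 + max - 1) / max = (((w.length + max.toNat - 1)/max.toNat : Nat) : Int) := by
    rw [Int.natCast_div]
    congr 1
    · push_cast [hcast]; omega
    · exact hcast.symm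
  simp only [PySem.List.pyRange, if_neg (by omega : ¬ max = 0), if_pos (by omega : (0:Int) < max),
    if_pos (by omega : (0:Int) < (w.length : Int)), hcount, Int.toNat_natCast, List.map_map]
  apply List.map_congr_left
  intro k _
  simp only [Function.comp_apply]
  have h1 : (0 : Int) + max * (k : Nat) = ((max.toNat * k : Nat) : Int) := by push_cast [hcast]; ring
  have h2 : ((max.toNat * k : Nat) : Int) + max = ((max.toNat * k : Nat) : Int) + ((max.toNat : Nat) : Int) := by
    rw [hcast]
  rw [h1, h2, PySem.List.slice_natCast_add]

-- ===== VERDICT =====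
theorem safe_pdf_line_spec : Claim_equal_safe_pdf_line := by
  intro line max hdom hpre
  unfold Spec_safe_pdf_line safe_pdf_line safe_pdf_line_alt
  simp only []
  have hpre' : 1 ≤ max := hpre
  have hm : 0 < max.toNat := by omega
  have hcast : ((max.toNat : Nat) : Int) = max := Int.toNat_of_nonneg (by omega)
  set m := max.toNat with hmdef
  set cs := line.toList with hcs
  congr 1
  -- step function as acc ++ g word
  have hstep : (fun (acc word : List Char) =>
      if (word.length : Int) > max then
        acc ++ PySem.Chars.join ['\u200B']
          ((PySem.List.pyRange 0 (word.length : Int) max).map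
            (fun i => PySem.List.slice word (some i) (some (i + max)))) ++ [' ']
      else acc ++ word ++ [' '])
      = (fun acc word => acc ++ (pvMarkGo m 0 word ++ [' '])) := by
    funext acc word
    by_cases hlen : (word.length : Int) > max
    · rw [if_pos hlen, pvRange_slice_eq word max hpre' hlen,
        pvChunks_eq m hm word.length word le_rfl (by omega)]
      simp
    · rw [if_neg hlen]
      rw [pvMarkGo_noins m word 0 (by omega)]
      simp
  rw [pvSplitOn_eq, hstep, PySem.List.foldl_append_eq_flatMap, List.nil_append,
    pvAltGo_eq max hpre' cs 0]
  obtain ⟨w₀, t, hw⟩ := List.exists_cons_of_ne_nil (pvSplitSp_ne_nil cs)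
  rw [hw, pvFlatMap_sep (fun w => pvMarkGo m 0 w) t w₀, pvStrip_append_space]
  simp [← hmdef]
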